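-- pv_equiv track=rewrite | github.com/AlexBuccheri/python | exciting/gw_benchmark_inputs/set4/A1_zr4_o3.py | restructure_energy_cutoffs
-- ===== SOURCE A (Python) =====
-- def restructure_energy_cutoffs(n_energies:int, energy_cutoffs: dict) -> list:
--     """
--     Get in a more useful structure to iterate over
--
--     TODO Automate to find n_energies
--
--     """
--     restructured_energies = []
--
--     for inum in range(0, n_energies):
--         data = {}
--         for species, l_channels in  energy_cutoffs.items():
--             data[species] = {l:energies[inum] for l, energies in l_channels.items()}
--         restructured_energies.append(data)
--
--     return restructured_energies
-- ===== SOURCE B (Python) =====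
-- def restructure_energy_cutoffs(n_energies: int, energy_cutoffs: dict) -> list:
--     """zip-transpose version: turn each species' l_channels into a list of
--     per-index {l: energy} dicts via zip(*...), then assemble row i from the
--     i-th precomputed column of every species."""
--     n = max(n_energies, 0)
--     per_species = {}
--     for species, l_channels in energy_cutoffs.items():
--         if l_channels:
--             cols = list(zip(*l_channels.values()))[:n]
--             per_species[species] = [dict(zip(l_channels, col)) for col in cols]
--         else:
--             per_species[species] = [{}] * n
--     return [{s: cols[i] for s, cols in per_species.items()} for i in range(n)]
-- ===== Notes on version B (the rewrite author's own statement) =====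
-- stated objective: alternative
-- what changed: B replaces A's per-index gathering loops (indexing energies[inum] inside a dict comprehension for each inum) by a zip(*...) transpose: each species' channel dict is converted once into a list of per-index {l: energy} dicts, and row i is then assembled from the i-th precomputed column of every species.
import Mathlib
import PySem

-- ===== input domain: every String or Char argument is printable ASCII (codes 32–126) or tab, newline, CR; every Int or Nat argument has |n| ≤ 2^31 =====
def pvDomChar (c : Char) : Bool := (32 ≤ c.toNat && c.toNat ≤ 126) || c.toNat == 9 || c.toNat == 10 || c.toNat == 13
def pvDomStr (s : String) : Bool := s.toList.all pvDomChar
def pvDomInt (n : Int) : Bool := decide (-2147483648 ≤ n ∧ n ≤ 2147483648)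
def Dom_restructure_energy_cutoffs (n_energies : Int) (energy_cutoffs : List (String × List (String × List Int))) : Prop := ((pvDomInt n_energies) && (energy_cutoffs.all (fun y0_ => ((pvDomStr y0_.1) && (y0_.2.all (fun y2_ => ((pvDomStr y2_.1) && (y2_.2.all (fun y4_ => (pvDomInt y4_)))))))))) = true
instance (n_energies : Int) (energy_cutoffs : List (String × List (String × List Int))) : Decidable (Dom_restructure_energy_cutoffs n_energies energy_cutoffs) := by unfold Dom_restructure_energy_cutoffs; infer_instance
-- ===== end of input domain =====

-- B replaces A's per-index gather (indexing energies[inum] for each inum) by a zip(*...)-style transpose of each species' channel lists into per-index column dicts; alternative decomposition, same cost. Pre_ excludes only inputs on which the Python raises IndexError (some energies list shorter than n_energies).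


-- ===== PORT A =====
-- {l: energies[inum] for l, energies in l_channels.items()}; inside Pre_ the index is in
-- range, so '.getD 0' never replaces a Python value (outside Pre_ Python raises IndexError).
def pvInnerA (l_channels : List (String × List Int)) (inum : Int) : List (String × Int) :=
  (l_channels.foldl
    (fun (d : PySem.Dict String Int) q => d.insert q.1 ((PySem.List.pyGet? q.2 inum).getD 0))
    PySem.Dict.empty).items

def restructure_energy_cutoffs (n_energies : Int) (energy_cutoffs : List (String × List (String × List Int))) : List (List (String × List (String × Int))) :=
  (PySem.List.pyRange 0 n_energies 1).foldl
    (fun restructured_energies inum =>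
      restructured_energies ++
        [(energy_cutoffs.foldl
            (fun (data : PySem.Dict String (List (String × Int))) p =>
              data.insert p.1 (pvInnerA p.2 inum))
            PySem.Dict.empty).items])
    []

-- ===== PORT B =====
-- zip(*lists) (columns up to the shortest list); the fuel is the first list's length,
-- which bounds the number of columns, so the fuel never runs out before a list does.
def pvTransposeFuel : Nat → List (List Int) → List (List Int)
  | 0, _ => []
  | f + 1, ls =>
    if ls.isEmpty || ls.any (fun l => l.isEmpty) then []
    else (ls.map (fun l => l.headD 0)) :: pvTransposeFuel f (ls.map List.tail)

def pvTranspose (ls : List (List Int)) : List (List Int) :=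
  pvTransposeFuel (match ls with | [] => 0 | l :: _ => l.length) ls

-- dict(zip(l_channels, col))
def pvDictZip (keys : List String) (col : List Int) : PySem.Dict String Int :=
  (keys.zip col).foldl (fun d q => d.insert q.1 q.2) PySem.Dict.empty

-- the if/else body of B's per-species loop
def pvCols (n : Int) (lc : List (String × List Int)) : List (PySem.Dict String Int) :=
  if lc.isEmpty then List.replicate n.toNat PySem.Dict.empty
  else ((pvTranspose (lc.map (fun q => q.2))).take n.toNat).map (pvDictZip (lc.map (fun q => q.1)))

def restructure_energy_cutoffs_alt (n_energies : Int) (energy_cutoffs : List (String × List (String × List Int))) : List (List (String × List (String × Int))) :=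
  let n := max n_energies 0
  let per_species := energy_cutoffs.foldl
    (fun (d : PySem.Dict String (List (PySem.Dict String Int))) p => d.insert p.1 (pvCols n p.2))
    PySem.Dict.empty
  -- 'cols[i]' is in range inside Pre_ (outside it Python raises IndexError), so '.getD empty' never fires
  (PySem.List.pyRange 0 n 1).map (fun i =>
    ((per_species.items.foldl
        (fun (d : PySem.Dict String (PySem.Dict String Int)) q =>
          d.insert q.1 ((PySem.List.pyGet? q.2 i).getD PySem.Dict.empty))
        PySem.Dict.empty).items).map (fun p => (p.1, p.2.items)))

-- ===== PRECONDITION & SPEC =====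
-- Pre_ excludes exactly the inputs on which the Python A raises IndexError: some energies list shorter than n_energies.
def Pre_restructure_energy_cutoffs (n_energies : Int) (energy_cutoffs : List (String × List (String × List Int))) : Prop :=
  ∀ p ∈ energy_cutoffs, ∀ q ∈ p.2, n_energies ≤ (q.2.length : Int)
instance (n_energies : Int) (energy_cutoffs : List (String × List (String × List Int))) : Decidable (Pre_restructure_energy_cutoffs n_energies energy_cutoffs) := by unfold Pre_restructure_energy_cutoffs; infer_instance
def pvWitness_restructure_energy_cutoffs : Int × (List (String × List (String × List Int))) :=
  (2, [("Zr", [("s", [100, 150]), ("p", [90, 140])]), ("O", [("d", [80, 130])])])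

def Spec_restructure_energy_cutoffs (n_energies : Int) (energy_cutoffs : List (String × List (String × List Int))) (out : List (List (String × List (String × Int)))) : Prop := out = restructure_energy_cutoffs_alt n_energies energy_cutoffs
instance (n_energies : Int) (energy_cutoffs : List (String × List (String × List Int))) (out : List (List (String × List (String × Int)))) : Decidable (Spec_restructure_energy_cutoffs n_energies energy_cutoffs out) := by unfold Spec_restructure_energy_cutoffs; infer_instance

-- ===== CLAIM (what is proved, stated in full; the proofs are below) =====
def Claim_equal_restructure_energy_cutoffs : Prop := ∀ (n_energies : Int) (energy_cutoffs : List (String × List (String × List Int))), Dom_restructure_energy_cutoffs n_energies energy_cutoffs → Pre_restructure_energy_cutoffs n_energies energy_cutoffs → Spec_restructure_energy_cutoffs n_energies energy_cutoffs (restructure_energy_cutoffs n_energies energy_cutoffs)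

-- ===== LEMMAS AND PROOFS =====

-- append-accumulating foldl is a map
theorem pvFoldAppend {α β : Type} (h : α → β) (l : List α) (acc : List β) :
    l.foldl (fun a i => a ++ [h i]) acc = acc ++ l.map h := by
  induction l generalizing acc with
  | nil => simp
  | cons x xs ih => simp [List.foldl_cons, ih]

-- range(0, n) over Int is the natural range, cast
theorem pvRangeEq (n : Int) :
    PySem.List.pyRange 0 n 1 = (List.range n.toNat).map (fun k : Nat => (k : Int)) := by
  by_cases h : 0 ≤ n
  · have := PySem.List.pyRange_zero_natCast n.toNat
    rwa [Int.toNat_of_nonneg h] at this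
  · rw [PySem.List.pyRange_one_eq_nil (by omega), Int.toNat_of_nonpos (by omega)]
    simp

-- mapping a function over the values of a dict commutes with insert-folds
def pvMapVal {κ ν ν' : Type} (F : ν → ν') (d : PySem.Dict κ ν) : PySem.Dict κ ν' :=
  PySem.Dict.mk (d.items.map (fun p => (p.1, F p.2)))

theorem pvMapVal_contains {κ ν ν' : Type} [BEq κ] (F : ν → ν') (d : PySem.Dict κ ν) (k : κ) :
    (pvMapVal F d).contains k = d.contains k := by
  simp [pvMapVal, PySem.Dict.contains, List.any_map, Function.comp_def]

theorem pvMapVal_insert {κ ν ν' : Type} [BEq κ] (F : ν → ν') (d : PySem.Dict κ ν) (k : κ) (v : ν) :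
    pvMapVal F (d.insert k v) = (pvMapVal F d).insert k (F v) := by
  apply PySem.Dict.ext
  show ((d.insert k v).items.map (fun p => (p.1, F p.2)))
      = ((pvMapVal F d).insert k (F v)).items
  rw [PySem.Dict.items_insert, PySem.Dict.items_insert, pvMapVal_contains]
  by_cases h : d.contains k = true
  · simp only [h, if_true]
    show _ = (pvMapVal F d).items.map _
    unfold pvMapVal
    simp only [List.map_map]
    apply List.map_congr_left
    intro p _
    by_cases hp : (p.1 == k) = true <;> simp [hp]
  · simp only [h]
    unfold pvMapVal
    simp

theorem pvFoldInsert_mapVal {κ ν ν' β : Type} [BEq κ] (F : ν → ν') (key : β → κ) (val : β → ν)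
    (l : List β) (d0 : PySem.Dict κ ν) :
    l.foldl (fun d p => d.insert (key p) (F (val p))) (pvMapVal F d0)
      = pvMapVal F (l.foldl (fun d p => d.insert (key p) (val p)) d0) := by
  induction l generalizing d0 with
  | nil => rfl
  | cons x xs ih => simp only [List.foldl_cons, ← pvMapVal_insert, ih]

-- the per-index inner dict gathered by A
def pvInnerD (l_channels : List (String × List Int)) (i : Int) : PySem.Dict String Int :=
  l_channels.foldl (fun d q => d.insert q.1 ((PySem.List.pyGet? q.2 i).getD 0)) PySem.Dict.empty

theorem pvInnerA_eq (lc : List (String × List Int)) (i : Int) :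
    pvInnerA lc i = (pvInnerD lc i).items := rfl

-- the raw dict over energy_cutoffs (last value wins for duplicate keys)
def pvD (ec : List (String × List (String × List Int))) : PySem.Dict String (List (String × List Int)) :=
  ec.foldl (fun d p => d.insert p.1 p.2) PySem.Dict.empty

theorem pvD_keys_nodup (ec : List (String × List (String × List Int))) : (pvD ec).keys.Nodup :=
  PySem.Dict.nodup_keys_foldl_insert_key ec (fun p => p.1) (fun _ p => p.2) PySem.Dict.empty
    PySem.Dict.nodup_keys_empty

-- every value stored in pvD comes from ec
theorem pvFoldMem {κ ν : Type} [BEq κ] [LawfulBEq κ] :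
    ∀ (l : List (κ × ν)) (d : PySem.Dict κ ν),
      ∀ p ∈ (l.foldl (fun d q => d.insert q.1 q.2) d).items,
        p ∈ d.items ∨ p.2 ∈ l.map (fun q => q.2) := by
  intro l
  induction l with
  | nil => intro d p hp; exact Or.inl hp
  | cons x xs ih =>
    intro d p hp
    rcases ih (d.insert x.1 x.2) p hp with h | h
    · rcases (PySem.Dict.mem_items_insert _ _ _ _).mp h with h' | h'
      · right; rw [h']; simp
      · exact Or.inl h'.1
    · right; simp [h]

theorem pvD_values (ec : List (String × List (String × List Int))) (p : String × List (String × List Int))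
    (hp : p ∈ (pvD ec).items) : p.2 ∈ ec.map (fun q => q.2) := by
  rcases pvFoldMem ec PySem.Dict.empty p hp with h | h
  · simp [PySem.Dict.empty] at h
  · exact h

-- A's per-index dict is pvMapVal of pvD
theorem pvRowA_eq (ec : List (String × List (String × List Int))) (i : Int) :
    ec.foldl (fun (data : PySem.Dict String (List (String × Int))) p =>
        data.insert p.1 (pvInnerA p.2 i)) PySem.Dict.empty
      = pvMapVal (fun lc => (pvInnerD lc i).items) (pvD ec) := by
  have := pvFoldInsert_mapVal (fun lc => (pvInnerD lc i).items) (fun p => p.1)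
    (fun (p : String × List (String × List Int)) => p.2) ec PySem.Dict.empty
  simpa [pvD, pvInnerA_eq] using this

-- B's per-species dict is pvMapVal of pvD
theorem pvPerSpecies_eq (n : Int) (ec : List (String × List (String × List Int))) :
    ec.foldl (fun (d : PySem.Dict String (List (PySem.Dict String Int))) p =>
        d.insert p.1 (pvCols n p.2)) PySem.Dict.empty
      = pvMapVal (pvCols n) (pvD ec) := by
  have := pvFoldInsert_mapVal (pvCols n) (fun p => p.1)
    (fun (p : String × List (String × List Int)) => p.2) ec PySem.Dict.empty
  simpa [pvD] using this

theorem pvHeadD (l : List Int) : l.headD 0 = l.getD 0 0 := by cases l <;> rfl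

theorem pvTailGetD (l : List Int) (k : Nat) : l.tail.getD k 0 = l.getD (k + 1) 0 := by
  cases l <;> rfl

-- column k of the transpose, when every list has more than k elements
theorem pvTransposeFuel_get (k : Nat) :
    ∀ (f : Nat) (ls : List (List Int)), ls ≠ [] → (∀ l ∈ ls, k < l.length) → k < f →
      (pvTransposeFuel f ls)[k]? = some (ls.map (fun l => l.getD k 0)) := by
  induction k with
  | zero =>
    intro f ls hne h hf
    cases f with
    | zero => omega
    | succ f' =>
      have hcond : (ls.isEmpty || ls.any (fun l => l.isEmpty)) = false := by
        rw [Bool.or_eq_false_iff]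
        refine ⟨by simpa [List.isEmpty_iff] using hne, ?_⟩
        rw [List.any_eq_false]
        intro l hl
        have := h l hl
        simp only [List.isEmpty_iff]
        intro e; subst e; simp at this
      unfold pvTransposeFuel
      rw [if_neg (by simp [hcond])]
      rw [List.getElem?_cons_zero]
      congr 1
      apply List.map_congr_left
      intro a _
      exact pvHeadD a
  | succ k ih =>
    intro f ls hne h hf
    cases f with
    | zero => omega
    | succ f' =>
      have hcond : (ls.isEmpty || ls.any (fun l => l.isEmpty)) = false := by
        rw [Bool.or_eq_false_iff]
        refine ⟨by simpa [List.isEmpty_iff] using hne, ?_⟩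
        rw [List.any_eq_false]
        intro l hl
        have := h l hl
        simp only [List.isEmpty_iff]
        intro e; subst e; simp at this
      unfold pvTransposeFuel
      rw [if_neg (by simp [hcond])]
      rw [List.getElem?_cons_succ]
      rw [ih f' (ls.map List.tail)
        (by simpa [List.map_eq_nil_iff] using hne)
        (by intro t ht
            rcases List.mem_map.mp ht with ⟨l, hl, rfl⟩
            have := h l hl
            rw [List.length_tail]; omega)
        (by omega)]
      simp only [List.map_map, Option.some.injEq, Function.comp_def]
      apply List.map_congr_left
      intro a _
      exact pvTailGetD a k

theorem pvTranspose_get (k : Nat) (ls : List (List Int)) (hne : ls ≠ [])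
    (h : ∀ l ∈ ls, k < l.length) :
    (pvTranspose ls)[k]? = some (ls.map (fun l => l.getD k 0)) := by
  unfold pvTranspose
  cases ls with
  | nil => exact absurd rfl hne
  | cons l0 rest =>
    exact pvTransposeFuel_get k l0.length (l0 :: rest) (by simp) h (h l0 (by simp))

-- the k-th column dict of pvCols is exactly A's gathered inner dict
theorem pvColsGet (ne : Int) (k : Nat) (hk : k < ne.toNat)
    (lc : List (String × List Int)) (hlen : ∀ q ∈ lc, ne ≤ (q.2.length : Int)) :
    (PySem.List.pyGet? (pvCols (max ne 0) lc) (k : Int)).getD PySem.Dict.empty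
      = pvInnerD lc (k : Int) := by
  have hk' : k < (max ne 0).toNat := by omega
  have hklen : ∀ q ∈ lc, k < q.2.length := by
    intro q hq; have := hlen q hq; omega
  unfold pvCols
  by_cases hlc : lc.isEmpty
  · rw [if_pos hlc, PySem.List.pyGet?_natCast]
    rw [List.isEmpty_iff] at hlc
    subst hlc
    have hrep : ((List.replicate (max ne 0).toNat (PySem.Dict.empty : PySem.Dict String Int))[k]?)
        = some PySem.Dict.empty := by rw [List.getElem?_replicate, if_pos hk']
    rw [hrep]
    rfl
  · rw [if_neg hlc, PySem.List.pyGet?_natCast, List.getElem?_map,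
      List.getElem?_take_of_lt hk',
      pvTranspose_get k (lc.map (fun q => q.2))
        (by intro hmap
            exact hlc (by rw [List.map_eq_nil_iff.mp hmap]; rfl))
        (by intro l hl
            rcases List.mem_map.mp hl with ⟨q, hq, rfl⟩
            exact hklen q hq)]
    show pvDictZip (lc.map (fun q => q.1)) ((lc.map (fun q => q.2)).map (fun l => l.getD k 0))
        = pvInnerD lc (k : Int)
    unfold pvDictZip pvInnerD
    rw [List.map_map]
    simp only [Function.comp_def]
    rw [show ((lc.map fun q => q.1).zip (lc.map fun q => q.2.getD k 0))
        = lc.map (fun q => (q.1, q.2.getD k 0)) from List.zip_map']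
    rw [List.foldl_map]
    congr 1
    funext d q
    rw [PySem.List.pyGet?_natCast, List.getD_eq_getElem?_getD]

-- ===== VERDICT (by name: the statement is the Claim_ definition above) =====
theorem restructure_energy_cutoffs_spec : Claim_equal_restructure_energy_cutoffs := by
  intro ne ec _ hpre
  unfold Spec_restructure_energy_cutoffs restructure_energy_cutoffs
  simp only [restructure_energy_cutoffs_alt]
  rw [pvFoldAppend, List.nil_append]
  have hrange : PySem.List.pyRange 0 (max ne 0) 1 = PySem.List.pyRange 0 ne 1 := by
    rw [pvRangeEq, pvRangeEq, show (max ne 0).toNat = ne.toNat by omega]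
  rw [hrange]
  apply List.map_congr_left
  intro i hi
  rw [pvRangeEq] at hi
  rcases List.mem_map.mp hi with ⟨k, hk, rfl⟩
  rw [List.mem_range] at hk
  rw [pvRowA_eq, pvPerSpecies_eq]
  have hfresh : ∀ a ∈ (pvMapVal (pvCols (max ne 0)) (pvD ec)).items,
      (PySem.Dict.empty : PySem.Dict String (PySem.Dict String Int)).contains a.1 = false := by
    intro a _; simp [PySem.Dict.contains_empty]
  have hnodup : ((pvMapVal (pvCols (max ne 0)) (pvD ec)).items.map (fun a => a.1)).Nodup := by
    have : (pvMapVal (pvCols (max ne 0)) (pvD ec)).items.map (fun a => a.1)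
        = (pvD ec).items.map (fun a => a.1) := by
      unfold pvMapVal; simp
    rw [this]
    exact pvD_keys_nodup ec
  rw [PySem.Dict.items_foldl_insert_fresh _ _ _ _ hfresh hnodup]
  show (pvMapVal (fun lc => (pvInnerD lc (k : Int)).items) (pvD ec)).items
      = (List.map _ ((PySem.Dict.empty : PySem.Dict String (PySem.Dict String Int)).items
          ++ (pvMapVal (pvCols (max ne 0)) (pvD ec)).items.map _))
  unfold pvMapVal
  simp only [PySem.Dict.empty, List.map_map, List.nil_append]
  show (pvD ec).items.map (fun p => (p.1, (pvInnerD p.2 (k : Int)).items)) = _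
  apply List.map_congr_left
  intro p hp
  simp only [Function.comp_def]
  rcases List.mem_map.mp (pvD_values ec p hp) with ⟨q, hq, hval⟩
  have hcg := pvColsGet ne k hk p.2 (by rw [← hval]; exact hpre q hq)
  congr 1
  exact (congrArg PySem.Dict.items hcg).symm
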